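-- pv_equiv track=rewrite | github.com/jinmoon23/TIL | pull_only_study/codes/08-data-structure/dict-practice/99-dict-practice-01.py | count_blood_types
-- ===== SOURCE A (Python) =====
-- def count_blood_types(blood_types):
--     result_dict = {}
--
--     count_A = 0
--     count_B = 0
--     count_O = 0
--     count_AB = 0
--     for type in blood_types:
--         if type == 'A':
--             count_A += 1
--         elif type == 'B':
--             count_B += 1
--         elif type == 'O':
--             count_O += 1
--         else:
--             count_AB += 1
--
--     result_dict['A'] = result_dict.get('A',count_A)
--     result_dict['B'] = result_dict.get('B',count_B)
--     result_dict['O'] = result_dict.get('O',count_O)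
--     result_dict['AB'] = result_dict.get('AB',count_AB)
--
--     return result_dict
-- ===== SOURCE B (Python) =====
-- def count_blood_types(blood_types):
--     bt = list(blood_types)
--     count_A = bt.count('A')
--     count_B = bt.count('B')
--     count_O = bt.count('O')
--     count_AB = len(bt) - count_A - count_B - count_O
--     return {'A': count_A, 'B': count_B, 'O': count_O, 'AB': count_AB}
-- ===== Notes on version B (the rewrite author's own statement) =====
-- stated objective: idiomatic
-- what changed: Replaces the single classifying loop with four counters by three targeted list.count scans plus a closed-form subtraction for the else-bucket.
import Mathlib
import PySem

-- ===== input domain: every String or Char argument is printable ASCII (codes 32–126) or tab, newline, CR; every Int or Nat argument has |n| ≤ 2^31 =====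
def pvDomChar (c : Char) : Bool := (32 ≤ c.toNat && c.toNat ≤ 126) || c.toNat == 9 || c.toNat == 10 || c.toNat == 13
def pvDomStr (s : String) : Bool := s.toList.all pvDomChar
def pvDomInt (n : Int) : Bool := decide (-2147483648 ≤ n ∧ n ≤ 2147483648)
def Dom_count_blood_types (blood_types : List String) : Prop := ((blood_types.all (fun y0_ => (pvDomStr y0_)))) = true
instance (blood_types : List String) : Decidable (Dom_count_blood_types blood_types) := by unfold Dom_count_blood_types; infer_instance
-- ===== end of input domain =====

-- B replaces A's single classifying loop with three targeted count scans and a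
-- closed-form subtraction for the else-bucket (idiomatic; same return value).

-- ===== PORT A =====
-- literal port of A: one pass accumulating four counters, then dict insertions
def count_blood_types (blood_types : List String) : List (String × Int) :=
  let counts := blood_types.foldl
    (fun (s : Int × Int × Int × Int) t =>
      if t == "A" then (s.1 + 1, s.2.1, s.2.2.1, s.2.2.2)
      else if t == "B" then (s.1, s.2.1 + 1, s.2.2.1, s.2.2.2)
      else if t == "O" then (s.1, s.2.1, s.2.2.1 + 1, s.2.2.2)
      else (s.1, s.2.1, s.2.2.1, s.2.2.2 + 1))
    (0, 0, 0, 0)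
  let d : PySem.Dict String Int := PySem.Dict.empty
  let d := d.insert "A" (d.getD "A" counts.1)
  let d := d.insert "B" (d.getD "B" counts.2.1)
  let d := d.insert "O" (d.getD "O" counts.2.2.1)
  let d := d.insert "AB" (d.getD "AB" counts.2.2.2)
  d.items

-- ===== PORT B =====
def count_blood_types_alt (blood_types : List String) : List (String × Int) :=
  let bt := blood_types
  let count_A : Int := PySem.List.count bt "A"
  let count_B : Int := PySem.List.count bt "B"
  let count_O : Int := PySem.List.count bt "O"
  let count_AB : Int := (bt.length : Int) - count_A - count_B - count_O
  [("A", count_A), ("B", count_B), ("O", count_O), ("AB", count_AB)]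

-- ===== PRECONDITION & SPEC =====
def Spec_count_blood_types (blood_types : List String) (out : List (String × Int)) : Prop := out = count_blood_types_alt blood_types
instance (blood_types : List String) (out : List (String × Int)) : Decidable (Spec_count_blood_types blood_types out) := by unfold Spec_count_blood_types; infer_instance

-- ===== CLAIM (what is proved, stated in full; the proofs are below) =====
def Claim_equal_count_blood_types : Prop := ∀ (blood_types : List String), Dom_count_blood_types blood_types → Spec_count_blood_types blood_types (count_blood_types blood_types)

-- ===== LEMMAS AND PROOFS =====
lemma fold_counts (l : List String) (a b o ab : Int) :
    l.foldl
      (fun (s : Int × Int × Int × Int) t =>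
        if t == "A" then (s.1 + 1, s.2.1, s.2.2.1, s.2.2.2)
        else if t == "B" then (s.1, s.2.1 + 1, s.2.2.1, s.2.2.2)
        else if t == "O" then (s.1, s.2.1, s.2.2.1 + 1, s.2.2.2)
        else (s.1, s.2.1, s.2.2.1, s.2.2.2 + 1))
      (a, b, o, ab)
    = (a + l.count "A", b + l.count "B", o + l.count "O",
       ab + ((l.length : Int) - l.count "A" - l.count "B" - l.count "O")) := by
  induction l generalizing a b o ab with
  | nil => simp
  | cons x xs ih =>
    by_cases hA : x = "A"
    · subst hA
      simp only [List.foldl_cons, ih, List.count_cons]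
      refine Prod.ext ?_ (Prod.ext ?_ (Prod.ext ?_ ?_)) <;> ((try simp); (try push_cast); (try ring); (try omega))
    · by_cases hB : x = "B"
      · subst hB
        simp only [List.foldl_cons, ih, List.count_cons]
        refine Prod.ext ?_ (Prod.ext ?_ (Prod.ext ?_ ?_)) <;> ((try simp); (try push_cast); (try ring); (try omega))
      · by_cases hO : x = "O"
        · subst hO
          simp only [List.foldl_cons, ih, List.count_cons]
          refine Prod.ext ?_ (Prod.ext ?_ (Prod.ext ?_ ?_)) <;> ((try simp); (try push_cast); (try ring); (try omega))
        · have eA : (x == "A") = false := beq_eq_false_iff_ne.mpr hA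
          have eB : (x == "B") = false := beq_eq_false_iff_ne.mpr hB
          have eO : (x == "O") = false := beq_eq_false_iff_ne.mpr hO
          simp only [List.foldl_cons, eA, eB, eO, if_false, ih, List.count_cons]
          refine Prod.ext ?_ (Prod.ext ?_ (Prod.ext ?_ ?_)) <;> ((try simp [hA, hB, hO]); (try push_cast); (try ring); (try omega))

-- ===== VERDICT (by name: the statement is the Claim_ definition above) =====
theorem count_blood_types_spec : Claim_equal_count_blood_types := by
  intro bt _
  show _ = _
  unfold count_blood_types count_blood_types_alt
  simp only [fold_counts, PySem.List.count_eq]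
  simp [PySem.Dict.insert, PySem.Dict.getD, PySem.Dict.get?, PySem.Dict.empty]
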